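-- pv_equiv track=rewrite | github.com/Deep-Learning-Profiling-Tools/linear-layout-viz | linear_layout_viz.py | _viewer_axis_labels
-- ===== SOURCE A (Python) =====
-- def _viewer_axis_labels(names: list[str]) -> list[str]:
--     """Convert dim names into viewer-safe axis labels."""
--
--     counts: dict[str, int] = {}
--     labels: list[str] = []
--     for name in names:
--         base = next((char.upper() for char in name if char.isalpha()), "A")
--         index = counts.get(base, 0)
--         counts[base] = index + 1
--         labels.append(base if index == 0 else f"{base}{index}")
--     return labels
-- ===== SOURCE B (Python) =====
-- def _viewer_axis_labels(names: list[str]) -> list[str]: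
--     """Convert dim names into viewer-safe axis labels."""
--
--     def first_alpha_upper(name: str) -> str:
--         alphas = [char for char in name if char.isalpha()]
--         return alphas[0].upper() if alphas else "A"
--
--     groups: dict[str, list[int]] = {}
--     for i, name in enumerate(names):
--         groups.setdefault(first_alpha_upper(name), []).append(i)
--     result = [""] * len(names)
--     for base, positions in groups.items():
--         for rank, pos in enumerate(positions):
--             result[pos] = base if rank == 0 else f"{base}{rank}"
--     return result
-- ===== Notes on version B (the rewrite author's own statement) =====
-- stated objective: alternative
-- what changed: B replaces A's single pass with a running per-base counter by a group-then-fill scheme: one dict pass collecting, for each base letter, the list of positions where it occurs, then a fill pass writing the bare base at each group's first position and base+rank at later ones into a preallocated result list.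
import Mathlib
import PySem

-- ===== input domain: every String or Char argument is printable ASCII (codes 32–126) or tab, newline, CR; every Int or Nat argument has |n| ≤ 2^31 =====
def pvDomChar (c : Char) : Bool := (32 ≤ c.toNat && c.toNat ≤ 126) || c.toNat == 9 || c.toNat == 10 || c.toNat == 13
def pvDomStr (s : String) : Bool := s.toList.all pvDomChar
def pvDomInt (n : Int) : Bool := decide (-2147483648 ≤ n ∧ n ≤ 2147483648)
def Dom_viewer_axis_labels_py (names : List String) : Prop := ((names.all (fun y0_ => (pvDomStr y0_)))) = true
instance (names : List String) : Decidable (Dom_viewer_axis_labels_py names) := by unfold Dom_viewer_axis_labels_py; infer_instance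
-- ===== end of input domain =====

-- B groups positions by base letter in one dict pass, then fills the result list
-- per group — same O(n) cost as A's running-counter pass, alternative decomposition.


-- ===== PORT A =====
-- next((char.upper() for char in name if char.isalpha()), "A")
def pvBaseA_go (cs : List Char) : String :=
  match cs with
  | [] => "A"
  | c :: rest => if PySem.Chars.isalpha c then String.ofList [PySem.Chars.upperChar c] else pvBaseA_go rest

def pvBaseA (name : String) : String := pvBaseA_go name.toList

def pvLoopA (rest : List String) (counts : PySem.Dict String Int) (labels : List String) : List String :=
  match rest with
  | [] => labels
  | name :: rs =>
    let base := pvBaseA name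
    let index := counts.getD base 0
    pvLoopA rs (counts.insert base (index + 1))
      (labels ++ [if index = 0 then base else base ++ PySem.Int.toStr index])

def viewer_axis_labels_py (names : List String) : List String :=
  pvLoopA names PySem.Dict.empty []

-- ===== PORT B =====
-- alphas = [char for char in name if char.isalpha()]; alphas[0].upper() if alphas else "A"
def pvBaseB (name : String) : String :=
  match name.toList.filter PySem.Chars.isalpha with
  | [] => "A"
  | c :: _ => String.ofList [PySem.Chars.upperChar c]

-- groups.setdefault(base, []).append(i)  ==  d[base] = d.get(base, []) + [i]  (exact: insertion order and in-place append agree)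
def viewer_axis_labels_py_alt (names : List String) : List String :=
  let groups := (PySem.List.enumerate names).foldl
      (fun d p => d.modify (pvBaseB p.2) [] (· ++ [p.1])) PySem.Dict.empty
  let result := List.replicate names.length ""
  groups.items.foldl
    (fun res q => (PySem.List.enumerate q.2).foldl
        (fun r t => PySem.List.pySetD r t.2 (if t.1 = 0 then q.1 else q.1 ++ PySem.Int.toStr t.1)) res)
    result

-- ===== PRECONDITION & SPEC =====
def Spec_viewer_axis_labels_py (names : List String) (out : List String) : Prop := out = viewer_axis_labels_py_alt names
instance (names : List String) (out : List String) : Decidable (Spec_viewer_axis_labels_py names out) := by unfold Spec_viewer_axis_labels_py; infer_instance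

-- ===== CLAIM (what is proved, stated in full; the proofs are below) =====
def Claim_equal_viewer_axis_labels_py : Prop := ∀ (names : List String), Dom_viewer_axis_labels_py names → Spec_viewer_axis_labels_py names (viewer_axis_labels_py names)

-- ===== LEMMAS AND PROOFS =====

-- The two base-letter extractors agree.
theorem pvBase_eq (name : String) : pvBaseA name = pvBaseB name := by
  unfold pvBaseA pvBaseB
  induction name.toList with
  | nil => simp [pvBaseA_go]
  | cons c cs ih =>
    by_cases h : PySem.Chars.isalpha c = true
    · simp [pvBaseA_go, h]
    · simp only [Bool.not_eq_true] at h
      simp [pvBaseA_go, h, ih]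

-- reference label of position i in a base list
def pvLabAt (bs : List String) (i : Nat) : String :=
  let b := bs.getD i ""
  let r := (bs.take i).count b
  if r = 0 then b else b ++ PySem.Int.toStr (r : Int)

def pvLabOf (k : String) (r : Nat) : String :=
  if r = 0 then k else k ++ PySem.Int.toStr (r : Int)

-- label each remaining base by its count in the prefix `pre` (A's loop, state-free)
def pvBuild (pre : List String) (rest : List String) : List String :=
  match rest with
  | [] => []
  | b :: rs =>
    let k : Int := (pre.count b : Int)
    (if k = 0 then b else b ++ PySem.Int.toStr k) :: pvBuild (pre ++ [b]) rs

theorem pvLoopA_eq (rest : List String) (pre : List String) (counts : PySem.Dict String Int)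
    (labels : List String) (hc : ∀ b, counts.getD b 0 = (pre.count b : Int)) :
    pvLoopA rest counts labels = labels ++ pvBuild pre (rest.map pvBaseA) := by
  induction rest generalizing pre counts labels with
  | nil => simp [pvLoopA, pvBuild]
  | cons name rs ih =>
    simp only [pvLoopA, List.map_cons, pvBuild]
    rw [ih (pre ++ [pvBaseA name]) _ _ ?_]
    · rw [hc (pvBaseA name), List.append_assoc]
      rfl
    · intro b
      rw [PySem.Dict.getD_insert, hc (pvBaseA name), List.count_append, List.count_singleton]
      by_cases hb : b = pvBaseA name
      · simp [hb]
      · simp [hb, hc b, Ne.symm hb]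

theorem pvBuild_eq_rangeMap (suf pre : List String) :
    pvBuild pre suf = (List.range suf.length).map (fun j => pvLabAt (pre ++ suf) (pre.length + j)) := by
  induction suf generalizing pre with
  | nil => simp [pvBuild]
  | cons b rs ih =>
    have hget : (pre ++ b :: rs).getD pre.length "" = b := by
      rw [List.getD_eq_getElem _ _ (by simp)]
      simp
    have htake : (pre ++ b :: rs).take pre.length = pre := by
      simp
    simp only [pvBuild, List.length_cons, List.range_succ_eq_map, List.map_cons, List.map_map,
      List.cons.injEq]
    constructor
    · simp only [pvLabAt, Nat.add_zero, hget, htake]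
      by_cases h0 : pre.count b = 0 <;> simp [h0]
    · rw [ih (pre ++ [b])]
      apply List.map_congr_left
      intro j _
      have harr : pre ++ [b] ++ rs = pre ++ b :: rs := by simp
      have hlen : pre.length + 1 + j = pre.length + (j + 1) := by omega
      simp [Function.comp, harr]
      rw [hlen]

-- positions of base k (as Nats)
def pvIdxs (bs : List String) (k : String) : List Nat :=
  (List.range bs.length).filter (fun j => bs.getD j "" == k)

-- all writes performed by B, with Nat indices
def pvWrites (bs : List String) : List (Nat × String) :=
  (PySem.Set.ofList bs).flatMap (fun k =>
    (List.range (pvIdxs bs k).length).map (fun r => ((pvIdxs bs k).getD r 0, pvLabOf k r)))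

def pvSetFold (W : List (Nat × String)) (res : List String) : List String :=
  W.foldl (fun r t => r.set t.1 t.2) res

theorem pvEnum_eq {α : Type} (xs : List α) (s : Int) (d : α) :
    PySem.List.enumerate xs s = (List.range xs.length).map (fun (j : Nat) => (s + (j : Int), xs.getD j d)) := by
  induction xs generalizing s with
  | nil => simp [PySem.List.enumerate_nil]
  | cons x xs ih =>
    rw [PySem.List.enumerate_cons, ih (s + 1)]
    simp only [List.length_cons, List.range_succ_eq_map, List.map_cons, List.map_map,
      List.getD_cons_zero, Nat.cast_zero, add_zero, List.cons.injEq, true_and]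
    apply List.map_congr_left
    intro j _
    simp only [Function.comp, List.getD_cons_succ, Prod.mk.injEq]
    exact ⟨by push_cast; ring, trivial⟩

theorem pvGetD_range_self {α : Type} (l : List α) (d : α) :
    (List.range l.length).map (fun r => l.getD r d) = l := by
  apply List.ext_getElem
  · simp
  · intro i h1 h2
    simp only [List.getElem_map, List.getElem_range]
    rw [List.getD_eq_getElem]

theorem pvInner_eq (bs : List String) (k : String) (res : List String) :
    (PySem.List.enumerate ((pvIdxs bs k).map (fun (j : Nat) => (j : Int)))).foldl
      (fun r t => PySem.List.pySetD r t.2 (if t.1 = 0 then k else k ++ PySem.Int.toStr t.1)) res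
    = pvSetFold ((List.range (pvIdxs bs k).length).map
        (fun r => ((pvIdxs bs k).getD r 0, pvLabOf k r))) res := by
  rw [pvEnum_eq ((pvIdxs bs k).map (fun (j : Nat) => (j : Int))) 0 0, List.foldl_map]
  unfold pvSetFold
  rw [List.foldl_map, List.length_map]
  apply PySem.List.foldl_congr_mem
  intro acc r hr
  rw [List.mem_range] at hr
  have hgd : ((pvIdxs bs k).map (fun (j : Nat) => (j : Int))).getD r 0 = ((pvIdxs bs k).getD r 0 : Int) := by
    rw [List.getD_eq_getElem _ _ (by simpa using hr), List.getElem_map,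
        List.getD_eq_getElem _ _ hr]
  simp only [hgd, zero_add, PySem.List.pySetD_natCast, pvLabOf, Nat.cast_eq_zero]

theorem pvAlt_eq_setFold (names : List String) :
    viewer_axis_labels_py_alt names
      = pvSetFold (pvWrites (names.map pvBaseB)) (List.replicate names.length "") := by
  unfold viewer_axis_labels_py_alt
  dsimp only
  set bs := names.map pvBaseB with hbs
  set G := (PySem.List.enumerate names).foldl
      (fun d p => d.modify (pvBaseB p.2) [] (· ++ [p.1])) PySem.Dict.empty with hG
  have hkeynodup : G.keys.Nodup := by
    rw [hG]
    exact PySem.Dict.nodup_keys_foldl_modify_key _ _ _ _ _ PySem.Dict.nodup_keys_empty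
  have hkeys : G.keys = PySem.Set.ofList bs := by
    rw [hG, PySem.Dict.keys_foldl_modify_key, PySem.Dict.keys_empty]
    have hm : (PySem.List.enumerate names).map (fun p => pvBaseB p.2) = bs := by
      conv_rhs => rw [hbs, ← PySem.List.map_snd_enumerate names 0]
      rw [List.map_map]
      rfl
    rw [hm]
    rfl
  have hgetD : ∀ k, G.getD k [] = (pvIdxs bs k).map (fun (j : Nat) => (j : Int)) := by
    intro k
    have hl' : (PySem.List.enumerate names).map (fun p => (pvBaseB p.2, p.1))
        = (List.range names.length).map (fun j => (bs.getD j "", (j : Int))) := by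
      rw [pvEnum_eq names 0 "", List.map_map]
      apply List.map_congr_left
      intro j hj
      rw [List.mem_range] at hj
      simp only [Function.comp, zero_add]
      congr 1
      rw [hbs, List.getD_eq_getElem _ _ hj,
          List.getD_eq_getElem _ _ (by simpa using hj), List.getElem_map]
    have hswap : (PySem.List.enumerate names).foldl
        (fun d p => d.modify (pvBaseB p.2) [] (· ++ [p.1])) PySem.Dict.empty
        = ((PySem.List.enumerate names).map (fun p => ((pvBaseB p.2 : String), (p.1 : Int)))).foldl
            (fun d q => d.modify q.1 [] (· ++ [q.2])) PySem.Dict.empty :=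
      (List.foldl_map (f := fun (p : Int × String) => ((pvBaseB p.2 : String), (p.1 : Int)))
        (g := fun (d : PySem.Dict String (List Int)) (q : String × Int) =>
          d.modify q.1 [] (· ++ [q.2]))).symm
    rw [hG, hswap, PySem.Dict.getD_foldl_modify_append, PySem.Dict.getD_empty, List.nil_append,
        hl', List.filter_map, List.map_map]
    simp only [pvIdxs, hbs, List.length_map]
    rfl
  have hitems : G.items = G.keys.map (fun k => (k, G.getD k [])) :=
    PySem.Dict.items_eq_map_keys G hkeynodup []
  rw [hitems, List.foldl_map, hkeys]
  have hrhs : pvSetFold (pvWrites bs) (List.replicate names.length "")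
      = (PySem.Set.ofList bs : List String).foldl
          (fun res k => pvSetFold ((List.range (pvIdxs bs k).length).map
              (fun r => ((pvIdxs bs k).getD r 0, pvLabOf k r))) res)
          (List.replicate names.length "") := by
    rw [pvWrites]
    unfold pvSetFold
    rw [List.flatMap_def, List.foldl_flatten, List.foldl_map]
  rw [hrhs]
  apply PySem.List.foldl_congr_mem
  intro acc k hk
  dsimp only
  rw [hgetD k]
  exact pvInner_eq bs k acc

theorem pvSetFold_length (W : List (Nat × String)) (res : List String) :
    (pvSetFold W res).length = res.length := by
  induction W generalizing res with
  | nil => rfl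
  | cons t W ih =>
    simp only [pvSetFold, List.foldl_cons] at *
    rw [ih]
    simp

theorem pvSetFold_getElem?_of_not_mem (W : List (Nat × String)) (res : List String) (i : Nat)
    (h : ∀ t ∈ W, t.1 ≠ i) : (pvSetFold W res)[i]? = res[i]? := by
  induction W generalizing res with
  | nil => rfl
  | cons t W ih =>
    simp only [pvSetFold, List.foldl_cons] at *
    rw [ih _ (fun u hu => h u (List.mem_cons_of_mem _ hu)),
        List.getElem?_set_ne (h t List.mem_cons_self)]

theorem pvSetFold_eq_rangeMap (W : List (Nat × String)) (res : List String) (n : Nat)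
    (f : Nat → String) (hres : res.length = n)
    (h1 : ∀ i < n, (i, f i) ∈ W) (h2 : (W.map (·.1)).Nodup) :
    pvSetFold W res = (List.range n).map f := by
  apply List.ext_getElem?
  intro i
  by_cases hi : i < n
  · obtain ⟨l1, l2, hW⟩ := List.append_of_mem (h1 i hi)
    subst hW
    have hmem : i ∉ l2.map (·.1) := by
      simp only [List.map_append, List.map_cons] at h2
      exact (List.nodup_cons.mp (List.Nodup.of_append_right h2)).1
    have hsplit : pvSetFold (l1 ++ (i, f i) :: l2) res
        = pvSetFold l2 ((pvSetFold l1 res).set i (f i)) := by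
      simp [pvSetFold, List.foldl_append]
    rw [hsplit, pvSetFold_getElem?_of_not_mem l2 _ i
        (fun t ht hc => hmem (hc ▸ List.mem_map_of_mem ht)),
      List.getElem?_set_self (by rw [pvSetFold_length, hres]; exact hi),
      List.getElem?_map, List.getElem?_range hi]
    rfl
  · rw [List.getElem?_eq_none (by rw [pvSetFold_length, hres]; omega),
        List.getElem?_eq_none (by simp; omega)]

theorem pvCount_filter_range (bs : List String) (b : String) (i : Nat) (hi : i ≤ bs.length) :
    ((List.range i).filter (fun j => bs.getD j "" == b)).length = (bs.take i).count b := by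
  induction i with
  | zero => simp
  | succ i ih =>
    have htk : bs.take (i + 1) = bs.take i ++ [bs.getD i ""] := by
      rw [List.take_add_one, List.getElem?_eq_getElem (by omega : i < bs.length),
          List.getD_eq_getElem _ _ (by omega)]
      rfl
    rw [List.range_succ, List.filter_append, List.length_append, htk, List.count_append,
        ih (by omega)]
    by_cases hp : bs[i]?.getD "" = b
    · simp [hp]
    · simp [List.getD, hp]

theorem pvMem_writes (bs : List String) (i : Nat) (hi : i < bs.length) :
    (i, pvLabAt bs i) ∈ pvWrites bs := by
  have hb : bs.getD i "" ∈ PySem.Set.ofList bs := by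
    rw [PySem.Set.mem_ofList, List.getD_eq_getElem _ _ hi]
    exact List.getElem_mem hi
  have hsplit : List.range bs.length
      = (List.range i ++ [i]) ++ (List.range (bs.length - (i+1))).map ((i+1) + ·) := by
    rw [← List.range_succ, ← List.range_add]
    congr 1
    omega
  have hidxs : pvIdxs bs (bs.getD i "")
      = ((List.range i).filter (fun j => bs.getD j "" == bs.getD i ""))
        ++ i :: ((List.range (bs.length - (i+1))).map ((i+1) + ·)).filter
              (fun j => bs.getD j "" == bs.getD i "") := by
    rw [pvIdxs, hsplit, List.filter_append, List.filter_append]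
    simp
  set B1 := (List.range i).filter (fun j => bs.getD j "" == bs.getD i "") with hB1
  have hgetr : (pvIdxs bs (bs.getD i "")).getD B1.length 0 = i := by
    rw [hidxs, List.getD_eq_getElem _ _ (by simp),
        List.getElem_append_right (by omega)]
    simp
  have hrlen : B1.length < (pvIdxs bs (bs.getD i "")).length := by
    rw [hidxs]
    simp
  have hcnt : B1.length = (bs.take i).count (bs.getD i "") :=
    pvCount_filter_range bs (bs.getD i "") i (by omega)
  rw [pvWrites, List.mem_flatMap]
  refine ⟨bs.getD i "", hb, ?_⟩
  rw [List.mem_map]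
  refine ⟨B1.length, by rw [List.mem_range]; exact hrlen, ?_⟩
  rw [hgetr]
  have : pvLabAt bs i = pvLabOf (bs.getD i "") ((bs.take i).count (bs.getD i "")) := rfl
  rw [this, ← hcnt]

theorem pvNodup_writes_fst (bs : List String) : ((pvWrites bs).map (·.1)).Nodup := by
  have hmap : (pvWrites bs).map (·.1) = (PySem.Set.ofList bs : List String).flatMap (pvIdxs bs) := by
    rw [pvWrites, List.map_flatMap, List.flatMap_def, List.flatMap_def]
    congr 1
    apply List.map_congr_left
    intro k _
    rw [List.map_map]
    exact pvGetD_range_self _ _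
  rw [hmap, List.flatMap_def, List.nodup_flatten]
  constructor
  · intro l hl
    obtain ⟨k, _, rfl⟩ := List.mem_map.mp hl
    exact List.Nodup.filter _ List.nodup_range
  · rw [List.pairwise_map]
    refine List.Pairwise.imp ?_ (PySem.Set.nodup_ofList bs)
    intro k k' hne j hj hj'
    have h1 := List.of_mem_filter hj
    have h2 := List.of_mem_filter hj'
    exact hne (by rw [← eq_of_beq h1, ← eq_of_beq h2])

-- ===== VERDICT (by name: the statement is the Claim_ definition above) =====
theorem viewer_axis_labels_py_spec : Claim_equal_viewer_axis_labels_py := by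
  intro names _
  unfold Spec_viewer_axis_labels_py
  have hb : names.map pvBaseA = names.map pvBaseB := List.map_congr_left (fun n _ => pvBase_eq n)
  have hA : viewer_axis_labels_py names
      = (List.range names.length).map (fun j => pvLabAt (names.map pvBaseB) j) := by
    unfold viewer_axis_labels_py
    rw [pvLoopA_eq names [] PySem.Dict.empty [] (by simp [PySem.Dict.getD_empty]), hb,
        pvBuild_eq_rangeMap]
    simp
  have hB : viewer_axis_labels_py_alt names
      = (List.range names.length).map (fun j => pvLabAt (names.map pvBaseB) j) := by
    rw [pvAlt_eq_setFold,
        pvSetFold_eq_rangeMap _ _ names.length _ (by simp)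
          (fun i hi => pvMem_writes _ i (by simpa using hi))
          (pvNodup_writes_fst _)]
  rw [hA, hB]
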